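-- pv_equiv track=rewrite | github.com/mortyc126-debug/rayon | src/geodesic_distance.py | compute_geodesic_from_inputs
-- ===== SOURCE A (Python) =====
-- def informational_distance(tt1, tt2, n):
--     """min(d(f,g), d(f, NOT(g)))"""
--     total = 2**n
--     d_same = sum(1 for b in range(total) if tt1[b] != tt2[b])
--     d_neg = total - d_same  # d(f, NOT(g))
--     return min(d_same, d_neg)
--
-- def compute_geodesic_from_inputs(n, tt_f):
--     """Compute informational distance from each input to f."""
--     total = 2**n
--     distances = []
--     for j in range(n):
--         tt_xj = {b: (b >> j) & 1 for b in range(total)}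
--         d = informational_distance(tt_xj, tt_f, n)
--         distances.append(d)
--     return distances
-- ===== SOURCE B (Python) =====
-- def compute_geodesic_from_inputs(n, tt_f):
--     """One counting sweep over the truth table instead of building a dict per input bit."""
--     if n <= 0:
--         return []
--     total = 2 ** n
--     d = [0] * n
--     for b in range(total):
--         v = tt_f[b]
--         d = [d[j] + (1 if ((b >> j) & 1) != v else 0) for j in range(n)]
--     return [min(dj, total - dj) for dj in d]
-- ===== Notes on version B (the rewrite author's own statement) =====
-- stated objective: alternative
-- what changed: Instead of building, for each input bit j, a fresh dict of the whole truth table and rescanning all 2^n entries per j, B makes a single sweep over b in range(2^n), reads tt_f[b] once, and maintains n running disagreement counters (one per bit), finishing with min(d_j, total-d_j).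
import Mathlib
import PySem

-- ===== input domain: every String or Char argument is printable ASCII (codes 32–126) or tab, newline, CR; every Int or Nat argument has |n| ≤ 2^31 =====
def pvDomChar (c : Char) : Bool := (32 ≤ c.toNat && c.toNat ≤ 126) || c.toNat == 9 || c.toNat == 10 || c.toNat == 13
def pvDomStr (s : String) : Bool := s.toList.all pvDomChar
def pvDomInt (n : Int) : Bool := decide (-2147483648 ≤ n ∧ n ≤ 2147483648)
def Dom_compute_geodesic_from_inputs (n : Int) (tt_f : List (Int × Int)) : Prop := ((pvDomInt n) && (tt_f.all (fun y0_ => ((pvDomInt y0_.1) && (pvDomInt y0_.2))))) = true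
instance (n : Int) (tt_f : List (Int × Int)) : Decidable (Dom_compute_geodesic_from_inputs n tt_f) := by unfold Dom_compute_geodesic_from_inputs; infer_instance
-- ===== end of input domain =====

-- B replaces A's per-bit dict construction and rescans by one counting sweep over the
-- truth table with n running disagreement counters (alternative decomposition, same cost class).

-- ===== PORT A =====
-- helper of A: min(d(f,g), d(f, NOT g)).  tt1[b]/tt2[b] would raise KeyError on a
-- missing key; Pre_ excludes that, the port uses getD 0 there.
def informational_distance (tt1 tt2 : PySem.Dict Int Int) (n : Int) : Int :=
  let total : Int := 2 ^ n.toNat   -- Python 2**n; for n < 0 the helper is never called by A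
  let d_same : Int := (PySem.List.pyRange 0 total 1).foldl
    (fun acc b => if tt1.getD b 0 ≠ tt2.getD b 0 then acc + 1 else acc) 0
  let d_neg := total - d_same
  min d_same d_neg

def compute_geodesic_from_inputs (n : Int) (tt_f : List (Int × Int)) : List Int :=
  -- Python computes total = 2**n up front; for n < 0 that is an (unused) float, the
  -- loop below is empty and [] is returned, so the toNat here is harmless.
  let total : Int := 2 ^ n.toNat
  (PySem.List.pyRange 0 n 1).foldl
    (fun distances j =>
      let tt_xj := (PySem.List.pyRange 0 total 1).foldl
        (fun d b => d.insert b (PySem.Int.band (b >>> (j.toNat : Int)) 1)) PySem.Dict.empty   -- j ≥ 0 in the loop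
      distances ++ [informational_distance tt_xj (PySem.Dict.mk tt_f) n]) []

-- ===== PORT B =====
def compute_geodesic_from_inputs_alt (n : Int) (tt_f : List (Int × Int)) : List Int :=
  if n ≤ 0 then []
  else
    let total : Int := 2 ^ n.toNat
    let d := (PySem.List.pyRange 0 total 1).foldl
      (fun d b =>
        let v := (PySem.Dict.mk tt_f).getD b 0   -- tt_f[b]; KeyError excluded by Pre_
        (PySem.List.pyRange 0 n 1).map
          (fun j => PySem.List.pyGetD d j 0 + (if (PySem.Int.band (b >>> (j.toNat : Int)) 1) ≠ v then 1 else 0)))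
      (List.replicate n.toNat 0)
    d.map (fun dj => min dj (total - dj))

-- ===== PRECONDITION & SPEC =====
-- Pre_: exactly where Python A returns normally: either the loop is empty (n ≤ 0) or every
-- b in range(2^n) is a key of tt_f (otherwise tt2[b] raises KeyError).  The n ≤ 31 and
-- length guards are redundant short-circuits: whenever all of 0..2^n-1 occur as keys the
-- list has ≥ 2^n entries, and inside Dom (|ints| ≤ 2^31) a key 2^n-1 with n ≥ 32 cannot
-- occur — so within Dom they exclude no input on which A returns.
def Pre_compute_geodesic_from_inputs (n : Int) (tt_f : List (Int × Int)) : Prop :=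
  n ≤ 0 ∨ (n ≤ 31 ∧ (2 ^ n.toNat ≤ (tt_f.length : Int)) ∧
    ∀ b ∈ PySem.List.pyRange 0 (2 ^ n.toNat) 1, ((PySem.Dict.mk tt_f).get? b).isSome = true)
instance (n : Int) (tt_f : List (Int × Int)) : Decidable (Pre_compute_geodesic_from_inputs n tt_f) := by
  unfold Pre_compute_geodesic_from_inputs; infer_instance

def pvWitness_compute_geodesic_from_inputs : Int × (List (Int × Int)) := (1, [(0, 0), (1, 1)])

def Spec_compute_geodesic_from_inputs (n : Int) (tt_f : List (Int × Int)) (out : List Int) : Prop := out = compute_geodesic_from_inputs_alt n tt_f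
instance (n : Int) (tt_f : List (Int × Int)) (out : List Int) : Decidable (Spec_compute_geodesic_from_inputs n tt_f out) := by unfold Spec_compute_geodesic_from_inputs; infer_instance

-- ===== CLAIM (what is proved, stated in full; the proofs are below) =====
def Claim_equal_compute_geodesic_from_inputs : Prop := ∀ (n : Int) (tt_f : List (Int × Int)), Dom_compute_geodesic_from_inputs n tt_f → Pre_compute_geodesic_from_inputs n tt_f → Spec_compute_geodesic_from_inputs n tt_f (compute_geodesic_from_inputs n tt_f)


-- ===== LEMMAS AND PROOFS =====

-- the per-bit disagreement count over a list of table indices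
def pvCnt (tt_f : List (Int × Int)) (j : Int) (L : List Int) : Int :=
  (L.countP (fun b : Int => decide (PySem.Int.band (b >>> (j.toNat : Int)) 1 ≠ (PySem.Dict.mk tt_f).getD b 0)) : Int)

-- a dict comprehension over distinct keys: lookup returns the comprehension's value
theorem pv_foldl_insert_getD (l : List Int) (hl : l.Nodup) (f : Int → Int) (b : Int) (hb : b ∈ l) :
    ((l.foldl (fun d x => d.insert x (f x)) (PySem.Dict.empty : PySem.Dict Int Int)).getD b 0) = f b := by
  have hitems : (l.foldl (fun d x => d.insert x (f x)) (PySem.Dict.empty : PySem.Dict Int Int)).items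
      = List.map (fun a => (a, f a)) l := by
    have := PySem.Dict.items_foldl_insert_fresh (l := l) (k := fun x => x) (v := f)
      (d := PySem.Dict.empty) (by intro a _; simp) (by simpa using hl)
    simpa using this
  have hnodup : ((l.foldl (fun d x => d.insert x (f x)) (PySem.Dict.empty : PySem.Dict Int Int)).keys).Nodup :=
    PySem.Dict.nodup_keys_foldl_insert l (fun d x => f x) PySem.Dict.empty (by simp)
  have hmem : (b, f b) ∈ (l.foldl (fun d x => d.insert x (f x)) (PySem.Dict.empty : PySem.Dict Int Int)).items := by
    rw [hitems]; exact List.mem_map_of_mem hb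
  exact PySem.Dict.getD_of_mem_items _ hmem hnodup 0

theorem pvCnt_cons (tt_f : List (Int × Int)) (j b : Int) (L : List Int) :
    pvCnt tt_f j (b :: L)
      = (if PySem.Int.band (b >>> (j.toNat : Int)) 1 ≠ (PySem.Dict.mk tt_f).getD b 0 then 1 else 0) + pvCnt tt_f j L := by
  unfold pvCnt
  rw [List.countP_cons]
  push_cast
  simp
  ring

-- B's fold over any list of table indices maintains the n per-bit disagreement counters
theorem pv_fold_inv (tt_f : List (Int × Int)) (n : Int) (L : List Int) :
    ∀ d0 : List Int, (d0.length : Int) = n →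
    L.foldl (fun (d : List Int) (b : Int) => (PySem.List.pyRange 0 n 1).map
        (fun j => PySem.List.pyGetD d j 0
          + (if PySem.Int.band (b >>> (j.toNat : Int)) 1 ≠ (PySem.Dict.mk tt_f).getD b 0 then 1 else 0))) d0
      = (PySem.List.pyRange 0 n 1).map (fun j => PySem.List.pyGetD d0 j 0 + pvCnt tt_f j L) := by
  induction L with
  | nil =>
    intro d0 hd
    simp only [List.foldl_nil, pvCnt, List.countP_nil, Int.natCast_zero, add_zero]
    rw [← hd]
    exact (PySem.List.map_pyGetD_pyRange_zero' d0 0).symm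
  | cons b L ih =>
    intro d0 hd
    rw [List.foldl_cons]
    rw [ih _ (by simp [PySem.List.length_pyRange_one]; omega)]
    apply List.map_congr_left
    intro j hj
    rw [PySem.List.mem_pyRange_one] at hj
    rw [PySem.List.pyGetD_map_pyRange_of_nonneg _ n j 0 hj.1 hj.2, pvCnt_cons]
    ring

-- A's j-th appended element is min(cnt, total - cnt) of the same disagreement count
theorem pv_A_char (n : Int) (tt_f : List (Int × Int)) :
    compute_geodesic_from_inputs n tt_f
      = (PySem.List.pyRange 0 n 1).map (fun j =>
          min (pvCnt tt_f j (PySem.List.pyRange 0 (2 ^ n.toNat) 1))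
              ((2 ^ n.toNat : Int) - pvCnt tt_f j (PySem.List.pyRange 0 (2 ^ n.toNat) 1))) := by
  unfold compute_geodesic_from_inputs
  rw [PySem.List.foldl_append_singleton_eq_map]
  rw [List.nil_append]
  apply List.map_congr_left
  intro j hj
  unfold informational_distance
  simp only [PySem.List.foldl_ite_add_one]
  have hc : List.countP
      (fun x => decide (((PySem.List.pyRange 0 (2 ^ n.toNat) 1).foldl
          (fun d b => d.insert b (PySem.Int.band (b >>> (j.toNat : Int)) 1)) PySem.Dict.empty).getD x 0
        ≠ (PySem.Dict.mk tt_f).getD x 0)) (PySem.List.pyRange 0 (2 ^ n.toNat) 1)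
      = List.countP
      (fun b : Int => decide (PySem.Int.band (b >>> (j.toNat : Int)) 1 ≠ (PySem.Dict.mk tt_f).getD b 0))
        (PySem.List.pyRange 0 (2 ^ n.toNat) 1) := by
    apply List.countP_congr
    intro b hb
    rw [pv_foldl_insert_getD _ (PySem.List.nodup_pyRange_one _ _) _ b hb]
  rw [hc]
  rw [zero_add]
  rfl

-- B's output is the same list of minima
theorem pv_B_char (n : Int) (tt_f : List (Int × Int)) (hn : 0 < n) :
    compute_geodesic_from_inputs_alt n tt_f
      = (PySem.List.pyRange 0 n 1).map (fun j =>
          min (pvCnt tt_f j (PySem.List.pyRange 0 (2 ^ n.toNat) 1))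
              ((2 ^ n.toNat : Int) - pvCnt tt_f j (PySem.List.pyRange 0 (2 ^ n.toNat) 1))) := by
  unfold compute_geodesic_from_inputs_alt
  simp only [if_neg (not_le.mpr hn)]
  rw [pv_fold_inv tt_f n (PySem.List.pyRange 0 (2 ^ n.toNat) 1) (List.replicate n.toNat 0)
    (by simp; omega)]
  rw [List.map_map]
  apply List.map_congr_left
  intro j hj
  rw [PySem.List.mem_pyRange_one] at hj
  simp only [Function.comp]
  rw [PySem.List.pyGetD_eq_getElem _ 0 hj.1 (by simp; omega)]
  simp

theorem compute_geodesic_from_inputs_spec : Claim_equal_compute_geodesic_from_inputs := by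
  unfold Claim_equal_compute_geodesic_from_inputs
  intro n tt_f _ _
  unfold Spec_compute_geodesic_from_inputs
  by_cases hn : n ≤ 0
  · unfold compute_geodesic_from_inputs compute_geodesic_from_inputs_alt
    rw [if_pos hn]
    rw [PySem.List.pyRange_one_eq_nil hn]
    rfl
  · rw [pv_A_char, pv_B_char n tt_f (not_le.mp hn)]
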